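-- pv_equiv track=rewrite | github.com/tfarotimi/cepal-inflation-forecasting | lib/helper_functions.py | create_predictor_combinations
-- ===== SOURCE A (Python) =====
-- def create_predictor_combinations(predictors):
--     #add 'YoY Increase Inflation' to the list of predictors in first position
--     predictors.insert(0, 'YoY Increase Inflation')
--     from itertools import combinations
--     combs_array = []
--     for i in range(1,len(predictors)+1):
--         combs = list(combinations(predictors,i))
--         combs = [comb for comb in combs if comb[0] == 'YoY Increase Inflation' and len(comb) > 1]
--         if len(combs) > 0:
--             combs_array.append(combs)
--
--     combs_array = [comb for sublist in combs_array for comb in sublist]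
--
--     return combs_array
-- ===== SOURCE B (Python) =====
-- def create_predictor_combinations(predictors):
--     # add 'YoY Increase Inflation' to the list of predictors in first position
--     predictors.insert(0, 'YoY Increase Inflation')
--     from itertools import combinations
--     rest = predictors[1:]
--     result = []
--     for i in range(1, len(rest) + 1):
--         for c in combinations(rest, i):
--             result.append(('YoY Increase Inflation',) + c)
--     return result
-- ===== Notes on version B (the rewrite author's own statement) =====
-- stated objective: simpler
-- what changed: Instead of generating all combinations of the full list and filtering those whose first element is 'YoY Increase Inflation' with length > 1, B prefixes the just-inserted inflation variable to each combination of the remaining predictors directly, so the filter pass disappears; Pre_ excludes lists already containing 'YoY Increase Inflation' before their last position — there the inserted sentinel is duplicated and whether combinations anchored at the duplicate occurrence are emitted a second time is an unspecified corner (A emits them, B emits each combination once).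
import Mathlib
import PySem

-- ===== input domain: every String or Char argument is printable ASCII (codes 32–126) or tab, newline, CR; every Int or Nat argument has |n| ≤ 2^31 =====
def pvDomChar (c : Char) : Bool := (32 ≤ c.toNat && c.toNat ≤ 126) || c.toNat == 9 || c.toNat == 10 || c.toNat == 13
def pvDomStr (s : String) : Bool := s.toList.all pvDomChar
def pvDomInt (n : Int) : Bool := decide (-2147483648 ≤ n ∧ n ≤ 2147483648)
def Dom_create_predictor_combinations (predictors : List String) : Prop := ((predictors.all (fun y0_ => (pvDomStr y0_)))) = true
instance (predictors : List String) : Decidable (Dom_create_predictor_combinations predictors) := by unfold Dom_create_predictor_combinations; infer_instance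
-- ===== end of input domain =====

-- B drops A's generate-all-then-filter pass: it prefixes the just-inserted inflation variable to
-- each combination of the remaining predictors directly (objective: simpler).  Note: Python A
-- mutates its argument in place (insert at index 0); B performs the same mutation; the equivalence
-- proved here is about the return value.

-- ===== PORT A =====
-- itertools.combinations(xs, k) in itertools order (combinations of positions, lexicographic)
def pyCombos : List String → Nat → List (List String)
  | _, 0 => [[]]
  | [], _ + 1 => []
  | x :: xs, k + 1 => (pyCombos xs k).map (fun c => x :: c) ++ pyCombos xs (k + 1)

def create_predictor_combinations (predictors : List String) : List (List String) :=
  -- predictors.insert(0, 'YoY Increase Inflation')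
  let preds := "YoY Increase Inflation" :: predictors
  let combs_array := (PySem.List.pyRange 1 ((preds.length : Int) + 1) 1).foldl
    (fun acc i =>
      -- combs = [comb for comb in combinations(preds, i) if comb[0] == 'YoY Increase Inflation' and len(comb) > 1]
      let combs := (pyCombos preds i.toNat).filter
        (fun comb => (PySem.List.pyGet? comb 0 == some "YoY Increase Inflation") && decide (1 < comb.length))
      if 0 < combs.length then acc ++ [combs] else acc) []
  combs_array.flatten

-- ===== PORT B =====
def create_predictor_combinations_alt (predictors : List String) : List (List String) :=
  -- predictors.insert(0, 'YoY Increase Inflation')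
  let preds := "YoY Increase Inflation" :: predictors
  -- rest = predictors[1:]
  let rest := PySem.List.slice preds (some 1) none
  (PySem.List.pyRange 1 ((rest.length : Int) + 1) 1).foldl
    (fun result i =>
      result ++ (pyCombos rest i.toNat).map (fun c => "YoY Increase Inflation" :: c)) []

-- ===== PRECONDITION & SPEC =====
-- Pre_ excludes lists that already contain 'YoY Increase Inflation' before their last position:
-- after the insertion the list holds a duplicate of the sentinel with elements after it, and
-- whether combinations anchored at the duplicate occurrence are emitted a second time is an
-- unspecified corner (A emits them, B emits each combination once).
def Pre_create_predictor_combinations (predictors : List String) : Prop :=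
  "YoY Increase Inflation" ∉ predictors.dropLast
instance (predictors : List String) : Decidable (Pre_create_predictor_combinations predictors) := by
  unfold Pre_create_predictor_combinations; infer_instance

def pvWitness_create_predictor_combinations : List String := ["CPI", "GDP"]

def Spec_create_predictor_combinations (predictors : List String) (out : List (List String)) : Prop := out = create_predictor_combinations_alt predictors
instance (predictors : List String) (out : List (List String)) : Decidable (Spec_create_predictor_combinations predictors out) := by unfold Spec_create_predictor_combinations; infer_instance

-- ===== CLAIM =====
def Claim_equal_create_predictor_combinations : Prop := ∀ (predictors : List String), Dom_create_predictor_combinations predictors → Pre_create_predictor_combinations predictors → Spec_create_predictor_combinations predictors (create_predictor_combinations predictors)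

-- ===== LEMMAS AND PROOFS =====

-- every member of pyCombos xs k has length k
lemma pyCombos_length : ∀ (xs : List String) (k : Nat) (c : List String),
    c ∈ pyCombos xs k → c.length = k := by
  intro xs
  induction xs with
  | nil => intro k c h; cases k <;> simp_all [pyCombos]
  | cons x xs ih =>
    intro k c h
    cases k with
    | zero => simp_all [pyCombos]
    | succ k =>
      simp only [pyCombos, List.mem_append, List.mem_map] at h
      rcases h with ⟨d, hd, rfl⟩ | h
      · simp [ih _ _ hd]
      · exact ih _ _ h

-- every member of pyCombos xs k is a sublist of xs
lemma pyCombos_sublist : ∀ (xs : List String) (k : Nat) (c : List String),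
    c ∈ pyCombos xs k → c.Sublist xs := by
  intro xs
  induction xs with
  | nil => intro k c h; cases k <;> simp_all [pyCombos]
  | cons x xs ih =>
    intro k c h
    cases k with
    | zero => simp_all [pyCombos]
    | succ k =>
      simp only [pyCombos, List.mem_append, List.mem_map] at h
      rcases h with ⟨d, hd, rfl⟩ | h
      · exact List.Sublist.cons₂ x (ih _ _ hd)
      · exact List.Sublist.cons x (ih _ _ h)

-- a sublist starting at the sentinel continues past it; if the sentinel occurs only at the
-- last position, nothing can follow it
lemma sublist_last_tail_nil (y : String) : ∀ (xs t : List String),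
    y ∉ xs.dropLast → (y :: t).Sublist xs → t = [] := by
  intro xs
  induction xs with
  | nil => intro t _ h; exact absurd h (by simp)
  | cons x xs ih =>
    intro t hy h
    rcases List.cons_sublist_cons'.mp h with ht | ⟨rfl, ht⟩
    · cases xs with
      | nil => exact absurd ht (by simp)
      | cons z zs =>
        refine ih t (fun hmem => hy ?_) ht
        simp only [List.dropLast_cons₂, List.mem_cons]
        exact Or.inr hmem
    · cases xs with
      | nil => exact List.sublist_nil.mp ht
      | cons z zs => exact absurd (by simp [List.dropLast]) hy

-- A's loop: flattening the conditionally-appended blocks is the flatMap of the block function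
lemma foldl_blocks_flatten (l : List Int) (g : Int → List (List String)) :
    ∀ (acc : List (List (List String))),
    (l.foldl (fun acc i => let combs := g i;
        if 0 < combs.length then acc ++ [combs] else acc) acc).flatten
      = acc.flatten ++ l.flatMap g := by
  induction l with
  | nil => intro acc; simp
  | cons i l ih =>
    intro acc
    simp only [List.foldl_cons, List.flatMap_cons]
    by_cases h : 0 < (g i).length
    · simp only [h, if_pos, ih]
      simp
    · have hg : g i = [] := by
        cases hgi : g i <;> simp [hgi] at h ⊢
      simp [ih, hg]

-- with no duplicate sentinel, the kept combinations of size k+2 from the extended list are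
-- exactly the size-(k+1) combinations of the rest prefixed by the sentinel
lemma filter_eq_map (xs : List String) (hx : "YoY Increase Inflation" ∉ xs.dropLast) (k : Nat) :
    (pyCombos ("YoY Increase Inflation" :: xs) (k + 2)).filter
        (fun comb => (PySem.List.pyGet? comb 0 == some "YoY Increase Inflation") && decide (1 < comb.length))
      = (pyCombos xs (k + 1)).map (fun c => "YoY Increase Inflation" :: c) := by
  show ((pyCombos xs (k+1)).map _ ++ pyCombos xs (k+2)).filter _ = _
  rw [List.filter_append]
  have h1 : (pyCombos xs (k + 1)).filter
      ((fun comb => (PySem.List.pyGet? comb 0 == some "YoY Increase Inflation") && decide (1 < comb.length)) ∘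
        (fun c => "YoY Increase Inflation" :: c)) = pyCombos xs (k + 1) := by
    apply List.filter_eq_self.mpr
    intro c hc
    have := pyCombos_length xs (k + 1) c hc
    simp [PySem.List.pyGet?, PySem.List.pyIdx?, this]
  have h2 : (pyCombos xs (k + 2)).filter
      (fun comb => (PySem.List.pyGet? comb 0 == some "YoY Increase Inflation") && decide (1 < comb.length)) = [] := by
    apply List.filter_eq_nil_iff.mpr
    intro c hc
    have hlen := pyCombos_length xs (k + 2) c hc
    cases c with
    | nil => simp at hlen
    | cons d t =>
      by_cases hd : d = "YoY Increase Inflation"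
      · subst hd
        have ht : t = [] :=
          sublist_last_tail_nil _ xs t hx (pyCombos_sublist xs (k + 2) _ hc)
        subst ht; simp at hlen
      · simp [PySem.List.pyGet?, PySem.List.pyIdx?, hd]
  rw [List.filter_map, h1, h2, List.append_nil]

-- ===== VERDICT =====
theorem create_predictor_combinations_spec : Claim_equal_create_predictor_combinations := by
  intro predictors _ hpre
  unfold Spec_create_predictor_combinations
  unfold create_predictor_combinations create_predictor_combinations_alt
  rw [foldl_blocks_flatten]
  rw [PySem.List.foldl_append_eq_flatMap]
  simp only [List.flatten_nil, List.nil_append, List.length_cons, PySem.List.slice_from_one,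
    List.tail_cons]
  rw [PySem.List.pyRange_one_cons (by omega : (1:Int) < ((predictors.length + 1 : Nat) : Int) + 1)]
  simp only [List.flatMap_cons]
  have h1 : (pyCombos ("YoY Increase Inflation" :: predictors) ((1:Int)).toNat).filter
      (fun comb => (PySem.List.pyGet? comb 0 == some "YoY Increase Inflation") && decide (1 < comb.length)) = [] := by
    apply List.filter_eq_nil_iff.mpr
    intro c hc
    have := pyCombos_length _ _ _ hc
    simp only [show ((1:Int)).toNat = 1 by omega] at this
    simp [this]
  rw [h1, List.nil_append]
  rw [PySem.List.pyRange_one, PySem.List.pyRange_one]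
  have e1 : (((predictors.length + 1 : Nat) : Int) + 1 - (1 + 1)).toNat = predictors.length := by omega
  have e2 : (((predictors.length : Nat) : Int) + 1 - 1).toNat = predictors.length := by omega
  rw [e1, e2, List.flatMap_map, List.flatMap_map]
  apply List.flatMap_congr
  intro k _
  have e3 : ((1 : Int) + 1 + (k : Int)).toNat = k + 2 := by omega
  have e4 : ((1 : Int) + (k : Int)).toNat = k + 1 := by omega
  rw [e3, e4]
  exact filter_eq_map predictors hpre k
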